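-- pv_equiv track=rewrite | github.com/peytontolbert/agent_kernel | agent_kernel/extensions/planner_recovery.py | planner_recovery_command_aligns_objective
-- ===== SOURCE A (Python) =====
-- def planner_recovery_objective_kind(objective: str) -> str:
--     normalized = str(objective).strip()
--     if normalized.startswith("update workflow path "):
--         return "workflow_path"
--     if normalized.startswith("regenerate generated artifact "):
--         return "generated_artifact"
--     if normalized.startswith("write workflow report "):
--         return "workflow_report"
--     if normalized.startswith("accept required branch "):
--         return "required_merge"
--     if normalized.startswith("prepare workflow branch "):
--         return "branch_target"
--     if normalized.startswith("run workflow test "):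
--         return "workflow_test"
--     return "other"
--
-- def planner_recovery_objective_target(objective: str) -> str:
--     normalized = str(objective).strip()
--     for prefix in (
--         "update workflow path ",
--         "regenerate generated artifact ",
--         "write workflow report ",
--         "accept required branch ",
--         "prepare workflow branch ",
--         "run workflow test ",
--     ):
--         if normalized.startswith(prefix):
--             return normalized.removeprefix(prefix).strip()
--     return ""
--
-- def planner_recovery_command_aligns_objective(command: str, objective: str) -> bool:
--     normalized_command = str(command).strip().lower()
--     target = planner_recovery_objective_target(objective).lower()
--     kind = planner_recovery_objective_kind(objective)
--     if not normalized_command or not target: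
--         return False
--     if kind in {"workflow_path", "generated_artifact", "workflow_report"}:
--         return target in normalized_command
--     if kind == "required_merge":
--         return "git merge" in normalized_command and target in normalized_command
--     if kind == "branch_target":
--         return target in normalized_command and any(
--             token in normalized_command for token in ("git checkout", "git switch", "git branch")
--         )
--     if kind == "workflow_test":
--         objective_tokens = {token for token in target.split() if len(token) > 2}
--         return (
--             ("test" in normalized_command or "pytest" in normalized_command)
--             and bool(objective_tokens.intersection(set(normalized_command.split())))
--         )
--     return False
-- ===== SOURCE B (Python) =====
-- # B is a declarative rule interpreter: the kind strings disappear; each prefix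
-- # maps directly to a CNF formula (clauses of atoms), evaluated by one generic
-- # all/any loop instead of A's branch-by-kind code.
--
-- # atoms: ("lit", s) = substring s in command; ("target",) = target in command;
-- # ("tokens",) = some target token of length > 2 is a whitespace word of command
-- _RULES = [
--     ("update workflow path ", [[("target",)]]),
--     ("regenerate generated artifact ", [[("target",)]]),
--     ("write workflow report ", [[("target",)]]),
--     ("accept required branch ", [[("lit", "git merge")], [("target",)]]),
--     ("prepare workflow branch ",
--      [[("target",)],
--       [("lit", "git checkout"), ("lit", "git switch"), ("lit", "git branch")]]),
--     ("run workflow test ",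
--      [[("lit", "test"), ("lit", "pytest")], [("tokens",)]]),
-- ]
--
--
-- def _holds(atom, cmd, target):
--     if atom[0] == "lit":
--         return atom[1] in cmd
--     if atom[0] == "target":
--         return target in cmd
--     words = cmd.split()
--     return any(len(t) > 2 and t in words for t in target.split())
--
--
-- def planner_recovery_command_aligns_objective(command: str, objective: str) -> bool:
--     normalized = objective.strip()
--     for prefix, clauses in _RULES:
--         if normalized.startswith(prefix):
--             cmd = command.strip().lower()
--             target = normalized[len(prefix):].strip().lower()
--             if not cmd or not target:
--                 return False
--             return all(any(_holds(a, cmd, target) for a in clause)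
--                        for clause in clauses)
--     return False
-- ===== Notes on version B (the rewrite author's own statement) =====
-- stated objective: alternative
-- what changed: B replaces A's kind classification and branch-by-kind code with a declarative rule table mapping each prefix directly to a CNF formula (clauses of atoms: literal substring / target substring / token overlap) evaluated by one generic all/any interpreter; the kind strings and the two helper scans disappear.
import Mathlib
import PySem

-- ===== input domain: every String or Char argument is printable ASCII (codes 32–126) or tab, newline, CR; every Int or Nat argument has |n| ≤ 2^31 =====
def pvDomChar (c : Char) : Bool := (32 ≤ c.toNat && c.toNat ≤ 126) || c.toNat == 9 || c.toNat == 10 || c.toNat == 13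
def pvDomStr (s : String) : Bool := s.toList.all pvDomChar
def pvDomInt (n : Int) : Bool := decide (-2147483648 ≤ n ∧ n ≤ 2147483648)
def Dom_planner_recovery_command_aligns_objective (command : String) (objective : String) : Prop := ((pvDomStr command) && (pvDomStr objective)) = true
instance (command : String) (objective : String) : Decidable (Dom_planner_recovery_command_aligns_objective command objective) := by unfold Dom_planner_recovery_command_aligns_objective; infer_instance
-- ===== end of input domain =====

-- B replaces A's kind classification and branch-by-kind code by a declarative rule
-- table (prefix → CNF formula of atoms) evaluated by one generic all/any interpreter:
-- objective = alternative decomposition, same asymptotic cost; return value only.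

-- ===== PORT A =====
def pvKindA (objective : String) : String :=
  let normalized := PySem.Str.strip objective
  if PySem.Str.startswith normalized "update workflow path " then "workflow_path"
  else if PySem.Str.startswith normalized "regenerate generated artifact " then "generated_artifact"
  else if PySem.Str.startswith normalized "write workflow report " then "workflow_report"
  else if PySem.Str.startswith normalized "accept required branch " then "required_merge"
  else if PySem.Str.startswith normalized "prepare workflow branch " then "branch_target"
  else if PySem.Str.startswith normalized "run workflow test " then "workflow_test"
  else "other"

-- A's for-loop over the prefix tuple with early return.
-- 'removeprefix' (guarded by startswith, so exact): drop the prefix's characters.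
def pvTargetLoopA (normalized : String) : List String → String
  | [] => ""
  | p :: rest =>
    if PySem.Str.startswith normalized p then
      PySem.Str.strip (String.ofList (normalized.toList.drop p.toList.length))
    else pvTargetLoopA normalized rest

def pvTargetA (objective : String) : String :=
  pvTargetLoopA (PySem.Str.strip objective)
    [ "update workflow path ", "regenerate generated artifact ", "write workflow report ",
      "accept required branch ", "prepare workflow branch ", "run workflow test " ]

def planner_recovery_command_aligns_objective (command : String) (objective : String) : Bool :=
  let normalized_command := PySem.Str.lower (PySem.Str.strip command)
  let target := PySem.Str.lower (pvTargetA objective)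
  let kind := pvKindA objective
  if normalized_command == "" || target == "" then false
  else if kind == "workflow_path" || kind == "generated_artifact" || kind == "workflow_report" then
    PySem.Str.isIn target normalized_command
  else if kind == "required_merge" then
    PySem.Str.isIn "git merge" normalized_command && PySem.Str.isIn target normalized_command
  else if kind == "branch_target" then
    PySem.Str.isIn target normalized_command &&
      (["git checkout", "git switch", "git branch"].any fun token => PySem.Str.isIn token normalized_command)
  else if kind == "workflow_test" then
    let objective_tokens :=
      PySem.Set.ofList ((PySem.Str.split₀ target).filter fun token => decide (2 < PySem.Str.len token))
    (PySem.Str.isIn "test" normalized_command || PySem.Str.isIn "pytest" normalized_command) &&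
      !(PySem.Set.inter objective_tokens (PySem.Set.ofList (PySem.Str.split₀ normalized_command))).isEmpty
  else false

-- ===== PORT B =====
-- atoms of B's rule language (the tuple tags "lit"/"target"/"tokens" of Source B)
inductive PvAtom : Type
  | lit : String → PvAtom
  | target : PvAtom
  | tokens : PvAtom
deriving DecidableEq, Repr

def pvHolds (a : PvAtom) (cmd target : String) : Bool :=
  match a with
  | .lit s => PySem.Str.isIn s cmd
  | .target => PySem.Str.isIn target cmd
  | .tokens =>
      let words := PySem.Str.split₀ cmd
      (PySem.Str.split₀ target).any fun t => decide (2 < PySem.Str.len t) && words.contains t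

-- the declarative rule table: prefix → CNF clauses
def pvRulesB : List (String × List (List PvAtom)) :=
  [ ("update workflow path ", [[.target]]),
    ("regenerate generated artifact ", [[.target]]),
    ("write workflow report ", [[.target]]),
    ("accept required branch ", [[.lit "git merge"], [.target]]),
    ("prepare workflow branch ",
      [[.target], [.lit "git checkout", .lit "git switch", .lit "git branch"]]),
    ("run workflow test ", [[.lit "test", .lit "pytest"], [.tokens]]) ]

def planner_recovery_command_aligns_objective_alt (command : String) (objective : String) : Bool :=
  let normalized := PySem.Str.strip objective
  match pvRulesB.find? (fun r => PySem.Str.startswith normalized r.1) with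
  | some (p, clauses) =>
      let cmd := PySem.Str.lower (PySem.Str.strip command)
      let target := PySem.Str.lower (PySem.Str.strip (String.ofList (normalized.toList.drop p.toList.length)))
      if cmd == "" || target == "" then false
      else clauses.all fun clause => clause.any fun a => pvHolds a cmd target
  | none => false

-- ===== PRECONDITION & SPEC =====
def Spec_planner_recovery_command_aligns_objective (command : String) (objective : String) (out : Bool) : Prop := out = planner_recovery_command_aligns_objective_alt command objective
instance (command : String) (objective : String) (out : Bool) : Decidable (Spec_planner_recovery_command_aligns_objective command objective out) := by unfold Spec_planner_recovery_command_aligns_objective; infer_instance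

-- ===== CLAIM (what is proved, stated in full; the proofs are below) =====
def Claim_equal_planner_recovery_command_aligns_objective : Prop := ∀ (command : String) (objective : String), Dom_planner_recovery_command_aligns_objective command objective → Spec_planner_recovery_command_aligns_objective command objective (planner_recovery_command_aligns_objective command objective)

-- ===== LEMMAS AND PROOFS =====

-- A's set-intersection nonemptiness equals B's tokens-atom (any over the target's words).
theorem pv_inter_any (a b : List String) (p : String → Bool) :
    (!(PySem.Set.inter (PySem.Set.ofList (a.filter p)) (PySem.Set.ofList b)).isEmpty)
      = a.any (fun t => p t && b.contains t) := by
  rw [Bool.eq_iff_iff]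
  simp only [Bool.not_eq_true', List.isEmpty_eq_false_iff_exists_mem, List.any_eq_true,
    Bool.and_eq_true, PySem.Set.mem_inter, PySem.Set.mem_ofList, List.mem_filter,
    List.contains_iff_mem]
  tauto

-- ===== VERDICT (by name: the statement is the Claim_ definition above) =====
theorem planner_recovery_command_aligns_objective_spec : Claim_equal_planner_recovery_command_aligns_objective := by
  intro command objective _
  unfold Spec_planner_recovery_command_aligns_objective
  unfold planner_recovery_command_aligns_objective planner_recovery_command_aligns_objective_alt
  unfold pvKindA pvTargetA pvRulesB
  simp only [List.find?_cons, List.find?_nil]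
  rcases h1 : PySem.Str.startswith (PySem.Str.strip objective) "update workflow path " <;>
  rcases h2 : PySem.Str.startswith (PySem.Str.strip objective) "regenerate generated artifact " <;>
  rcases h3 : PySem.Str.startswith (PySem.Str.strip objective) "write workflow report " <;>
  rcases h4 : PySem.Str.startswith (PySem.Str.strip objective) "accept required branch " <;>
  rcases h5 : PySem.Str.startswith (PySem.Str.strip objective) "prepare workflow branch " <;>
  rcases h6 : PySem.Str.startswith (PySem.Str.strip objective) "run workflow test " <;>
    simp only [h1, h2, h3, h4, h5, h6, pvTargetLoopA, pvHolds, pv_inter_any,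
      Bool.false_eq_true, ite_true, ite_false, List.all_cons, List.all_nil,
      List.any_cons, List.any_nil, Bool.and_true, Bool.or_false] <;>
    split <;> simp
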